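-- pv_equiv track=rewrite | github.com/muneebaifrah/Unstop-100-Days-Coding-Sprint | Day-76/2.One_Diff.py | find_good_numbers
-- ===== SOURCE A (Python) =====
-- def find_good_numbers(n):
--     good_numbers = []
--     for num in range(n + 1):
--         s = str(num)
--         if len(s) == 1:
--             good_numbers.append(num)
--             continue
--         good = True
--         for i in range(1, len(s)):
--             if abs(int(s[i]) - int(s[i - 1])) != 1:
--                 good = False
--                 break
--         if good:
--             good_numbers.append(num)
--     return good_numbers
--
--     pass
-- ===== SOURCE B (Python) =====
-- def find_good_numbers(n):
--     # Build good numbers digit-by-digit (BFS by digit count) instead of testing every number up to n.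
--     if n < 9:
--         return [] if n < 0 else list(range(n + 1))
--     res = list(range(10))
--     cur = list(range(1, 10))
--     t = n
--     while t >= 10:
--         nxt = []
--         for v in cur:
--             last = v % 10
--             for d in (last - 1, last + 1):
--                 if 0 <= d <= 9:
--                     w = 10 * v + d
--                     if w <= n:
--                         nxt.append(w)
--         res.extend(nxt)
--         cur = nxt
--         t //= 10
--     return sorted(res)
-- ===== Notes on version B (the rewrite author's own statement) =====
-- stated objective: faster
-- what changed: Instead of testing every number in 0..n via its string digits, B constructs the good numbers themselves digit-by-digit (BFS level per digit count, extending each number by last_digit±1) and sorts the small result list.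
import Mathlib
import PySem

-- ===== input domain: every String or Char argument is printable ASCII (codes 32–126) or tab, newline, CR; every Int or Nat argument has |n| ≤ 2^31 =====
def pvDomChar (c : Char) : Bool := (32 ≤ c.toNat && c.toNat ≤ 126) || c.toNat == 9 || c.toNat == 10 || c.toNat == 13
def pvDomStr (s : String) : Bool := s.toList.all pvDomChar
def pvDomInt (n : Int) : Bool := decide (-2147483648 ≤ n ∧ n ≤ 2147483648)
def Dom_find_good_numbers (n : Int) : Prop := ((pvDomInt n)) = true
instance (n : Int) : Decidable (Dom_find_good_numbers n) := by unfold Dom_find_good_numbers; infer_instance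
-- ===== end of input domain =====

-- B replaces A's test of every number in 0..n by digit-by-digit construction of the good
-- numbers themselves (level by level on digit count), then one sort; measured faster.

-- ===== PORT A =====
-- int(s[i]) on the 1-char string s[i]; the `.getD 0` default is unreachable here (indices in
-- range, digit characters) and only makes the port total.
def pvDigitAt (s : String) (i : Int) : Int :=
  ((PySem.Str.pyGet? s i).bind (fun c => PySem.Int.ofChars? [c])).getD 0

-- the inner `for i in range(1, len(s))` with its `break` = returning false at once
def pvInnerA (s : String) : List Int → Bool
  | [] => true
  | i :: rest =>
      if (pvDigitAt s i - pvDigitAt s (i - 1)).natAbs ≠ 1 then false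
      else pvInnerA s rest

def find_good_numbers (n : Int) : List Int :=
  (PySem.List.pyRange 0 (n + 1) 1).foldl (fun acc num =>
    let s := PySem.Int.toStr num
    if PySem.Str.len s = 1 then acc ++ [num]
    else if pvInnerA s (PySem.List.pyRange 1 (PySem.Str.len s) 1) then acc ++ [num]
    else acc) []

-- ===== PORT B =====
-- one BFS level: `for v in cur: for d in (last - 1, last + 1): …`
def pvLevel (n : Int) (cur : List Int) : List Int :=
  cur.foldl (fun nxt v =>
    let last := PySem.Int.mod v 10
    [last - 1, last + 1].foldl (fun nxt d =>
      if 0 ≤ d ∧ d ≤ 9 then (if 10 * v + d ≤ n then nxt ++ [10 * v + d] else nxt)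
      else nxt) nxt) []

-- the `while t >= 10` loop
def pvLoop (n : Int) (res cur : List Int) (t : Int) : List Int :=
  if 10 ≤ t then
    let nxt := pvLevel n cur
    pvLoop n (res ++ nxt) nxt (PySem.Int.floordiv t 10)
  else res
termination_by t.toNat
decreasing_by
  simp only [PySem.Int.floordiv_eq_ediv_of_pos (by norm_num : (0:Int) < 10)]
  omega

def find_good_numbers_alt (n : Int) : List Int :=
  if n < 9 then (if n < 0 then [] else PySem.List.pyRange 0 (n + 1) 1)
  else PySem.List.sorted
        (pvLoop n (PySem.List.pyRange 0 10 1) (PySem.List.pyRange 1 10 1) n)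
        (fun x => x) false

-- ===== PRECONDITION & SPEC =====
def Spec_find_good_numbers (n : Int) (out : List Int) : Prop := out = find_good_numbers_alt n
instance (n : Int) (out : List Int) : Decidable (Spec_find_good_numbers n out) := by unfold Spec_find_good_numbers; infer_instance

-- ===== CLAIM (what is proved, stated in full; the proofs are below) =====
def Claim_equal_find_good_numbers : Prop := ∀ (n : Int), Dom_find_good_numbers n → Spec_find_good_numbers n (find_good_numbers n)

-- ===== LEMMAS AND PROOFS =====

-- arithmetic characterisation of "adjacent decimal digits differ by 1"
def pvGood (m : Int) : Bool :=
  if 10 ≤ m then ((m % 10 - m / 10 % 10).natAbs == 1) && pvGood (m / 10)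
  else true
termination_by m.toNat
decreasing_by omega

-- int(c) for a single character
def pvDval (c : Char) : Int := (PySem.Int.ofChars? [c]).getD 0

-- adjacent-pair check on a char list (what A's inner loop computes)
def pvAdj : List Char → Bool
  | a :: b :: r => ((pvDval b - pvDval a).natAbs == 1) && pvAdj (b :: r)
  | _ => true

-- A's per-number test, folded out of the loop body
def pvTestA (num : Int) : Bool :=
  let s := PySem.Int.toStr num
  if PySem.Str.len s = 1 then true
  else pvInnerA s (PySem.List.pyRange 1 (PySem.Str.len s) 1)

lemma pvGood_small {x : Int} (h : x < 10) : pvGood x = true := by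
  rw [pvGood, if_neg (by omega)]

lemma find_good_numbers_eq_filter (n : Int) :
    find_good_numbers n = (PySem.List.pyRange 0 (n + 1) 1).filter pvTestA := by
  unfold find_good_numbers
  have hbody : (fun (acc : List Int) num =>
      let s := PySem.Int.toStr num
      if PySem.Str.len s = 1 then acc ++ [num]
      else if pvInnerA s (PySem.List.pyRange 1 (PySem.Str.len s) 1) then acc ++ [num]
      else acc)
      = fun acc x => if pvTestA x = true then acc ++ [(fun y => y) x] else acc := by
    funext acc x
    unfold pvTestA
    by_cases h1 : PySem.Str.len (PySem.Int.toStr x) = 1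
    · rw [if_pos h1, if_pos (by rw [if_pos h1])]
    · rw [if_neg h1]
      by_cases h2 : pvInnerA (PySem.Int.toStr x)
        (PySem.List.pyRange 1 (PySem.Str.len (PySem.Int.toStr x)) 1) = true
      · rw [if_pos h2, if_pos (by rw [if_neg h1]; exact h2)]
      · rw [if_neg h2, if_neg (by rw [if_neg h1]; exact h2)]
  rw [hbody, PySem.List.foldl_append_if pvTestA (fun y => y)]
  simp [List.map_id']

lemma pvDval_digitChar (d : Nat) (hd : d < 10) : pvDval (Nat.digitChar d) = (d : Int) := by
  interval_cases d <;> decide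

lemma getLast?_toDigits (m : Nat) :
    (Nat.toDigits 10 m).getLast? = some (Nat.digitChar (m % 10)) := by
  by_cases h : m < 10
  · rw [Nat.toDigits_of_lt_base h, Nat.mod_eq_of_lt h]; rfl
  · rw [Nat.toDigits_of_base_le (b := 10) (by norm_num) (Nat.le_of_not_lt h), List.getLast?_concat]

lemma pvAdj_snoc (xs : List Char) (c : Char) :
    pvAdj (xs ++ [c]) =
      (pvAdj xs && (match xs.getLast? with
        | none => true
        | some b => ((pvDval c - pvDval b).natAbs == 1))) := by
  induction xs with
  | nil => simp [pvAdj]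
  | cons a t ih =>
    cases t with
    | nil => simp [pvAdj]
    | cons b t' =>
      simp only [List.cons_append, pvAdj, List.getLast?_cons_cons] at *
      rw [ih, Bool.and_assoc]

lemma pvAdj_toDigits (m : Nat) : pvAdj (Nat.toDigits 10 m) = pvGood (m : Int) := by
  induction m using Nat.strong_induction_on with
  | _ m IH =>
    by_cases h : m < 10
    · rw [Nat.toDigits_of_lt_base h]
      rw [pvGood]
      have : ¬ (10 : Int) ≤ (m : Int) := by omega
      simp [this, pvAdj]
    · rw [Nat.toDigits_of_base_le (b := 10) (by norm_num) (Nat.le_of_not_lt h), pvAdj_snoc,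
        getLast?_toDigits]
      simp only [pvDval_digitChar _ (Nat.mod_lt _ (by norm_num : (0:Nat) < 10)),
        IH (m / 10) (by omega)]
      conv_rhs => rw [pvGood]
      have h10 : (10 : Int) ≤ (m : Int) := by omega
      have e1 : ((m : Int)) % 10 = ((m % 10 : Nat) : Int) := by omega
      have e2 : ((m : Int)) / 10 = ((m / 10 : Nat) : Int) := by omega
      have e3 : ((m : Int)) / 10 % 10 = ((m / 10 % 10 : Nat) : Int) := by omega
      rw [if_pos h10, e1, e3, e2, Bool.and_comm]

lemma pvAdj_short (l : List Char) (h : l.length ≤ 1) : pvAdj l = true := by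
  match l, h with
  | [], _ => rfl
  | [a], _ => rfl

lemma pvDigitAt_nat (s : String) (k : Nat) (hk : k < s.toList.length) :
    pvDigitAt s (k : Int) = pvDval s.toList[k] := by
  simp [pvDigitAt, List.getElem?_eq_getElem hk, pvDval]

lemma pvInnerA_eq_pvAdj (s : String) (k : Nat) (hk : 1 ≤ k) :
    pvInnerA s (PySem.List.pyRange (k : Int) (PySem.Str.len s) 1) = pvAdj (s.toList.drop (k - 1)) := by
  by_cases h : s.toList.length ≤ k
  · rw [PySem.List.pyRange_one_eq_nil (by rw [PySem.Str.len_eq]; omega)]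
    rw [pvAdj_short _ (by simp only [List.length_drop]; omega)]
    rfl
  · rw [not_le] at h
    rw [PySem.List.pyRange_one_cons (by rw [PySem.Str.len_eq]; omega)]
    have e1 : (k : Int) - 1 = ((k - 1 : Nat) : Int) := by omega
    have ed1 : s.toList.drop (k - 1) = s.toList[k-1] :: s.toList.drop k :=
      List.drop_eq_getElem_cons (by omega) |>.trans (by rw [show k - 1 + 1 = k from by omega])
    have ed2 : s.toList.drop k = s.toList[k] :: s.toList.drop (k + 1) :=
      List.drop_eq_getElem_cons (by omega)
    have hrec : pvInnerA s (PySem.List.pyRange ((k : Int) + 1) (PySem.Str.len s) 1)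
        = pvAdj (s.toList.drop k) := by
      have := pvInnerA_eq_pvAdj s (k + 1) (by omega)
      simpa using this
    rw [pvInnerA, e1, pvDigitAt_nat s k (by omega), pvDigitAt_nat s (k-1) (by omega), hrec]
    rw [ed1, ed2, pvAdj]
    by_cases hc : (pvDval s.toList[k] - pvDval s.toList[k-1]).natAbs = 1
    · simp [hc, ← ed2]
    · simp [hc, ← ed2]
termination_by s.toList.length - k
decreasing_by omega

lemma pvTestA_eq_pvGood (m : Int) (hm : 0 ≤ m) : pvTestA m = pvGood m := by
  have hcs : (PySem.Int.toStr m).toList = Nat.toDigits 10 m.toNat := by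
    rw [PySem.Int.toList_toStr]
    unfold PySem.Int.toChars
    rw [if_neg (by omega)]
  unfold pvTestA
  by_cases h1 : (Nat.toDigits 10 m.toNat).length = 1
  · rw [if_pos (by rw [PySem.Str.len_eq, hcs, h1]; rfl)]
    have : m.toNat < 10 := by
      have := (Nat.length_toDigits_le_iff (b := 10) (n := m.toNat) (k := 1)
        (by norm_num) (by norm_num)).mp (by omega)
      simpa using this
    exact (pvGood_small (by omega)).symm
  · rw [if_neg (by rw [PySem.Str.len_eq, hcs]; exact_mod_cast fun h => h1 (by exact_mod_cast h))]
    have hinner := pvInnerA_eq_pvAdj (PySem.Int.toStr m) 1 le_rfl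
    simp only [Nat.cast_one, Nat.sub_self, List.drop_zero] at hinner
    rw [hinner, hcs, pvAdj_toDigits, Int.toNat_of_nonneg hm]

-- B-side: one level as a flatMap
def pvCands (n v : Int) : List Int :=
  (if 0 ≤ v % 10 - 1 ∧ v % 10 - 1 ≤ 9 ∧ 10 * v + (v % 10 - 1) ≤ n then [10 * v + (v % 10 - 1)] else []) ++
  (if 0 ≤ v % 10 + 1 ∧ v % 10 + 1 ≤ 9 ∧ 10 * v + (v % 10 + 1) ≤ n then [10 * v + (v % 10 + 1)] else [])

lemma pvLevel_eq_flatMap (n : Int) (cur : List Int) :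
    pvLevel n cur = cur.flatMap (pvCands n) := by
  unfold pvLevel
  have hbody : (fun (nxt : List Int) v =>
      let last := PySem.Int.mod v 10
      [last - 1, last + 1].foldl (fun nxt d =>
        if 0 ≤ d ∧ d ≤ 9 then (if 10 * v + d ≤ n then nxt ++ [10 * v + d] else nxt)
        else nxt) nxt) = fun nxt v => nxt ++ pvCands n v := by
    funext nxt v
    show List.foldl _ nxt [PySem.Int.mod v 10 - 1, PySem.Int.mod v 10 + 1] = _
    rw [PySem.Int.mod_eq_emod_of_pos (by norm_num)]
    simp only [List.foldl_cons, List.foldl_nil, pvCands]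
    split_ifs <;> simp_all <;> omega
  rw [hbody, PySem.List.foldl_append_eq_flatMap]
  simp

lemma mem_pvCands {n v x : Int} :
    x ∈ pvCands n v ↔ ∃ d : Int, (d = v % 10 - 1 ∨ d = v % 10 + 1) ∧ 0 ≤ d ∧ d ≤ 9 ∧ x = 10 * v + d ∧ x ≤ n := by
  unfold pvCands
  constructor
  · intro hx
    rcases List.mem_append.1 hx with h | h <;> split_ifs at h with hc
    · rw [List.mem_singleton] at h; subst h
      exact ⟨_, Or.inl rfl, hc.1, hc.2.1, rfl, hc.2.2⟩
    · simp at h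
    · rw [List.mem_singleton] at h; subst h
      exact ⟨_, Or.inr rfl, hc.1, hc.2.1, rfl, hc.2.2⟩
    · simp at h
  · rintro ⟨d, hd | hd, h0, h9, hx, hn⟩ <;> subst hd <;> subst hx <;>
      refine List.mem_append.2 ?_
    · exact Or.inl (by rw [if_pos ⟨h0, h9, hn⟩]; exact List.mem_singleton.2 rfl)
    · exact Or.inr (by rw [if_pos ⟨h0, h9, hn⟩]; exact List.mem_singleton.2 rfl)

-- membership invariant for one BFS level
def pvLvl (n : Int) (k : Nat) (x : Int) : Prop :=
  10 ^ (k - 1) ≤ x ∧ x < 10 ^ k ∧ x ≤ n ∧ pvGood x = true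

lemma pvGood_of_parts {x : Int} (h10 : 10 ≤ x)
    (hc : (x % 10 - x / 10 % 10).natAbs = 1) (hg : pvGood (x / 10) = true) :
    pvGood x = true := by
  rw [pvGood, if_pos h10, hg, Bool.and_true, beq_iff_eq, hc]

lemma pvGood_parts {x : Int} (h10 : 10 ≤ x) (hg : pvGood x = true) :
    (x % 10 - x / 10 % 10).natAbs = 1 ∧ pvGood (x / 10) = true := by
  rw [pvGood, if_pos h10, Bool.and_eq_true, beq_iff_eq] at hg
  exact hg

lemma pow_succ_10 (k : Nat) (hk : 1 ≤ k) : (10 : Int) ^ k = 10 * 10 ^ (k - 1) := by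
  calc (10:Int) ^ k = 10 ^ (k - 1 + 1) := by rw [Nat.sub_add_cancel hk]
  _ = 10 * 10 ^ (k - 1) := by rw [pow_succ]; ring

lemma mem_pvLevel {n : Int} {k : Nat} {cur : List Int} (hk : 1 ≤ k)
    (hcur : ∀ x, x ∈ cur ↔ pvLvl n k x) :
    ∀ x, x ∈ pvLevel n cur ↔ pvLvl n (k + 1) x := by
  intro x
  rw [pvLevel_eq_flatMap, List.mem_flatMap]
  have hP : (1 : Int) ≤ 10 ^ (k - 1) := one_le_pow₀ (by norm_num)
  have hPk : (10 : Int) ^ k = 10 * 10 ^ (k - 1) := pow_succ_10 k hk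
  have hPk1 : (10 : Int) ^ (k + 1) = 10 * 10 ^ k := by rw [pow_succ]; ring
  constructor
  · rintro ⟨v, hv, hx⟩
    rw [hcur] at hv
    obtain ⟨hv1, hv2, hv3, hv4⟩ := hv
    rcases mem_pvCands.1 hx with ⟨d, hd, h0, h9, hxe, hxn⟩
    have h10x : (10 : Int) ≤ x := by omega
    have hdiv : x / 10 = v := by omega
    have hmod : x % 10 = d := by omega
    refine ⟨?_, ?_, hxn, ?_⟩
    · simp only [Nat.add_sub_cancel]; omega
    · omega
    · refine pvGood_of_parts h10x ?_ (hdiv ▸ hv4)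
      rw [hdiv, hmod]
      rcases hd with hd | hd <;> omega
  · intro hx
    obtain ⟨hx1, hx2, hx3, hx4⟩ := hx
    simp only [Nat.add_sub_cancel] at hx1
    have h10x : (10 : Int) ≤ x := by omega
    obtain ⟨hc, hg⟩ := pvGood_parts h10x hx4
    refine ⟨x / 10, ?_, ?_⟩
    · rw [hcur]
      refine ⟨?_, ?_, ?_, hg⟩
      · rw [Int.le_ediv_iff_mul_le (by norm_num)]; omega
      · rw [Int.ediv_lt_iff_lt_mul (by norm_num)]; omega
      · have := Int.ediv_le_self 10 (le_trans (by norm_num) h10x); omega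
    · rw [mem_pvCands]
      exact ⟨x % 10, by omega, by omega, by omega, by omega, hx3⟩

lemma pairwise_pvCands (n v : Int) : (pvCands n v).Pairwise (· < ·) := by
  unfold pvCands
  split_ifs <;> simp

lemma mem_pvCands_bounds {n v x : Int} (hx : x ∈ pvCands n v) :
    10 * v ≤ x ∧ x ≤ 10 * v + 9 := by
  rcases mem_pvCands.1 hx with ⟨d, _, h0, h9, hxe, _⟩
  omega

lemma pairwise_pvLevel {n : Int} {cur : List Int}
    (hp : cur.Pairwise (· < ·)) (h0 : ∀ x ∈ cur, 0 ≤ x) :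
    (pvLevel n cur).Pairwise (· < ·) := by
  rw [pvLevel_eq_flatMap]
  induction cur with
  | nil => simp
  | cons v vs ih =>
    rw [List.flatMap_cons, List.pairwise_append]
    refine ⟨pairwise_pvCands n v, ih hp.of_cons (fun x hx => h0 x (List.mem_cons_of_mem _ hx)), ?_⟩
    intro a ha b hb
    rcases List.mem_flatMap.1 hb with ⟨w, hw, hbw⟩
    have hvw : v < w := (List.pairwise_cons.1 hp).1 w hw
    have h1 := mem_pvCands_bounds ha
    have h2 := mem_pvCands_bounds hbw
    omega

lemma pvLoop_inv (n : Int) :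
    ∀ (T : Nat) (t : Int), t.toNat = T → ∀ (k : Nat) (res cur : List Int), 1 ≤ k →
    t = n / 10 ^ (k - 1) →
    (∀ x, x ∈ res ↔ (0 ≤ x ∧ x < 10 ^ k ∧ x ≤ n ∧ pvGood x = true)) →
    res.Pairwise (· < ·) →
    (∀ x, x ∈ cur ↔ pvLvl n k x) →
    cur.Pairwise (· < ·) →
    (∀ x, x ∈ pvLoop n res cur t ↔ (0 ≤ x ∧ x ≤ n ∧ pvGood x = true)) ∧
      (pvLoop n res cur t).Pairwise (· < ·) := by
  intro T
  induction T using Nat.strong_induction_on with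
  | _ T IH =>
    intro t hT k res cur hk htk hres hresp hcur hcurp
    have hP : (1 : Int) ≤ 10 ^ (k - 1) := one_le_pow₀ (by norm_num)
    have hPk : (10 : Int) ^ k = 10 * 10 ^ (k - 1) := pow_succ_10 k hk
    rw [pvLoop]
    by_cases h10 : 10 ≤ t
    · rw [if_pos h10]
      have hfd : PySem.Int.floordiv t 10 = t / 10 :=
        PySem.Int.floordiv_eq_ediv_of_pos (by norm_num)
      have htk' : t / 10 = n / 10 ^ (k + 1 - 1) := by
        rw [htk, Int.ediv_ediv_of_nonneg (by positivity)]
        congr 1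
        rw [Nat.add_sub_cancel, hPk]; ring
      have hPk1 : (10 : Int) ^ (k + 1) = 10 * 10 ^ k := by rw [pow_succ]; ring
      have hnxt := mem_pvLevel hk hcur
      have hnxtp : (pvLevel n cur).Pairwise (· < ·) :=
        pairwise_pvLevel hcurp (fun x hx => by
          have := ((hcur x).1 hx).1; omega)
      rw [hfd]
      refine IH (t / 10).toNat (by omega) (t / 10) rfl (k + 1)
        (res ++ pvLevel n cur) (pvLevel n cur) (by omega) htk' ?_ ?_ hnxt hnxtp
      · intro x
        rw [List.mem_append, hres x, hnxt x]
        unfold pvLvl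
        simp only [Nat.add_sub_cancel]
        constructor
        · rintro (⟨a, b, c, d⟩ | ⟨a, b, c, d⟩) <;> exact ⟨by omega, by omega, c, d⟩
        · rintro ⟨a, b, c, d⟩
          by_cases hsz : x < 10 ^ k
          · exact Or.inl ⟨a, hsz, c, d⟩
          · exact Or.inr ⟨by omega, by omega, c, d⟩
      · rw [List.pairwise_append]
        refine ⟨hresp, hnxtp, fun a ha b hb => ?_⟩
        have h1 := ((hres a).1 ha).2.1
        have h2 := ((hnxt b).1 hb).1
        simp only [Nat.add_sub_cancel] at h2
        omega
    · rw [if_neg h10]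
      have hlt : n < 10 ^ k := by
        rw [htk] at h10
        rw [not_le, Int.ediv_lt_iff_lt_mul (by positivity)] at h10
        omega
      refine ⟨fun x => ?_, hresp⟩
      rw [hres x]
      constructor
      · rintro ⟨a, b, c, d⟩; exact ⟨a, c, d⟩
      · rintro ⟨a, c, d⟩; exact ⟨a, by omega, c, d⟩

-- ===== VERDICT (by name: the statement is the Claim_ definition above) =====
theorem find_good_numbers_spec : Claim_equal_find_good_numbers := by
  intro n _
  unfold Spec_find_good_numbers find_good_numbers_alt
  rw [find_good_numbers_eq_filter]
  have hfil : (PySem.List.pyRange 0 (n + 1) 1).filter pvTestA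
      = (PySem.List.pyRange 0 (n + 1) 1).filter pvGood :=
    List.filter_congr (fun x hx => by
      rw [pvTestA_eq_pvGood x (PySem.List.mem_pyRange_one.1 hx).1])
  rw [hfil]
  by_cases h9 : n < 9
  · rw [if_pos h9]
    by_cases hneg : n < 0
    · rw [if_pos hneg, PySem.List.pyRange_one_eq_nil (by omega), List.filter_nil]
    · rw [if_neg hneg]
      apply List.filter_eq_self.2
      intro x hx
      have := PySem.List.mem_pyRange_one.1 hx
      exact pvGood_small (by omega)
  · rw [if_neg h9, not_lt] at *
    have init_res : ∀ x, x ∈ PySem.List.pyRange 0 10 1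
        ↔ (0 ≤ x ∧ x < 10 ^ 1 ∧ x ≤ n ∧ pvGood x = true) := by
      intro x
      rw [PySem.List.mem_pyRange_one, pow_one]
      constructor
      · rintro ⟨a, b⟩; exact ⟨a, b, by omega, pvGood_small b⟩
      · rintro ⟨a, b, _, _⟩; exact ⟨a, b⟩
    have init_cur : ∀ x, x ∈ PySem.List.pyRange 1 10 1 ↔ pvLvl n 1 x := by
      intro x
      rw [PySem.List.mem_pyRange_one]
      unfold pvLvl
      rw [Nat.sub_self, pow_zero, pow_one]
      constructor
      · rintro ⟨a, b⟩; exact ⟨a, b, by omega, pvGood_small b⟩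
      · rintro ⟨a, b, _, _⟩; exact ⟨a, b⟩
    have ht0 : n = n / 10 ^ (1 - 1) := by simp
    obtain ⟨hmem, hpw⟩ := pvLoop_inv n n.toNat n rfl 1
      (PySem.List.pyRange 0 10 1) (PySem.List.pyRange 1 10 1) le_rfl ht0
      init_res (PySem.List.pairwise_lt_pyRange_one 0 10)
      init_cur (PySem.List.pairwise_lt_pyRange_one 1 10)
    symm
    apply PySem.List.sorted_eq_of_perm_of_pairwise_lt
    · rw [List.perm_ext_iff_of_nodup
        (((PySem.List.pairwise_lt_pyRange_one 0 (n + 1)).filter pvGood).imp ne_of_lt)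
        (hpw.imp ne_of_lt)]
      intro x
      rw [List.mem_filter, PySem.List.mem_pyRange_one, hmem x]
      constructor
      · rintro ⟨⟨a, b⟩, g⟩; exact ⟨a, by omega, g⟩
      · rintro ⟨a, b, g⟩; exact ⟨⟨a, by omega⟩, g⟩
    · exact (PySem.List.pairwise_lt_pyRange_one 0 (n + 1)).filter pvGood
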